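-- pv_equiv track=rewrite | github.com/jhwa426/Python | COMPSCI 130/Assignment/Assignment02/Assignment 2.py | highest_value_word
-- ===== SOURCE A (Python) =====
-- def highest_value_word(word1, word2, ordinal_position=1):
--     index_position = ordinal_position - 1
--     min_pos = min(len(word1), len(word2))
--
--     if ordinal_position > min_pos:
--         if len(word1) == len(word2):
--             return 0
--         elif len(word1) > len(word2):
--             return -ordinal_position
--         else:
--             return ordinal_position
--     if min_pos >= ordinal_position:
--         if ord(word1[index_position]) == ord(word2[index_position]):
--             return highest_value_word(word1, word2, ordinal_position + 1)
--         elif ord(word1[index_position]) > ord(word2[index_position]):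
--             return -ordinal_position
--         else:
--             return ordinal_position
-- ===== SOURCE B (Python) =====
-- def highest_value_word(word1, word2, ordinal_position=1):
--     pos = ordinal_position
--     min_pos = min(len(word1), len(word2))
--     while pos <= min_pos:
--         a, b = word1[pos - 1], word2[pos - 1]
--         if a == b:
--             pos += 1
--         elif a > b:
--             return -pos
--         else:
--             return pos
--     if len(word1) == len(word2):
--         return 0
--     return -pos if len(word1) > len(word2) else pos
-- ===== Notes on version B (the rewrite author's own statement) =====
-- stated objective: simpler
-- what changed: Replaced the recursion (one stack frame per compared character) with a single explicit while loop over a running position, and compared characters directly instead of via ord().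
import Mathlib
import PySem

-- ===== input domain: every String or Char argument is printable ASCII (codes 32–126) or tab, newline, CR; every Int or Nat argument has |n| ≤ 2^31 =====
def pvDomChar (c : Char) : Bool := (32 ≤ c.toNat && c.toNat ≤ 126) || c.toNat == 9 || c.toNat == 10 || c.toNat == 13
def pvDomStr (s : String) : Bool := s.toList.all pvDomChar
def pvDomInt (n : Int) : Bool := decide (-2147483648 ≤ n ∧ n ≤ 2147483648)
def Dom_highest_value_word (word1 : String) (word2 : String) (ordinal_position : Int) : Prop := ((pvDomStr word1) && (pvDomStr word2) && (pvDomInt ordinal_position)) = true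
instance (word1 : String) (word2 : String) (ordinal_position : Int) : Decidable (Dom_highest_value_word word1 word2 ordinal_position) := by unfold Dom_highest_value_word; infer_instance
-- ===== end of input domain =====

-- B replaces A's recursion by a single explicit while loop with a running position
-- (same return values; comparison via Char order instead of ord codes).

-- ===== PORT A =====
-- Literal port of A's recursion; the `| _, _ => 0` arm is Python's IndexError
-- (negative index past the start of a word), excluded by Pre_ below.
def highest_value_word (word1 : String) (word2 : String) (ordinal_position : Int) : Int :=
  let min_pos : Int := min (PySem.Str.len word1) (PySem.Str.len word2)
  if _h : ordinal_position > min_pos then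
    if PySem.Str.len word1 = PySem.Str.len word2 then 0
    else if PySem.Str.len word1 > PySem.Str.len word2 then -ordinal_position
    else ordinal_position
  else
    match PySem.Str.pyGet? word1 (ordinal_position - 1), PySem.Str.pyGet? word2 (ordinal_position - 1) with
    | some c1, some c2 =>
      if c1.toNat = c2.toNat then highest_value_word word1 word2 (ordinal_position + 1)
      else if c1.toNat > c2.toNat then -ordinal_position
      else ordinal_position
    | _, _ => 0
termination_by (min (PySem.Str.len word1) (PySem.Str.len word2) + 1 - ordinal_position).toNat
decreasing_by simp only [not_lt] at _h; omega

-- ===== PORT B =====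
-- The while loop of Source B; `pos` is the loop variable, `min_pos` is fixed.
def hvw_loop (word1 : String) (word2 : String) (min_pos : Int) (pos : Int) : Int :=
  if _h : pos ≤ min_pos then
    match PySem.Str.pyGet? word1 (pos - 1) with
    | none => 0
    | some a =>
      match PySem.Str.pyGet? word2 (pos - 1) with
      | none => 0
      | some b =>
        if a = b then hvw_loop word1 word2 min_pos (pos + 1)
        else if a > b then -pos
        else pos
  else if PySem.Str.len word1 = PySem.Str.len word2 then 0
  else if PySem.Str.len word1 > PySem.Str.len word2 then -pos
  else pos
termination_by (min_pos + 1 - pos).toNat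
decreasing_by omega

def highest_value_word_alt (word1 : String) (word2 : String) (ordinal_position : Int) : Int :=
  hvw_loop word1 word2 (min (PySem.Str.len word1) (PySem.Str.len word2)) ordinal_position

-- ===== PRECONDITION & SPEC =====
-- Pre_ excludes exactly the inputs where Python A raises IndexError: an
-- ordinal_position so far below 1 that the (negative) index ordinal_position-1
-- falls before the start of the shorter word. A never returns there.
def Pre_highest_value_word (word1 : String) (word2 : String) (ordinal_position : Int) : Prop :=
  ordinal_position ≥ 1 - min (PySem.Str.len word1) (PySem.Str.len word2)
instance (word1 : String) (word2 : String) (ordinal_position : Int) : Decidable (Pre_highest_value_word word1 word2 ordinal_position) := by unfold Pre_highest_value_word; infer_instance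

def pvWitness_highest_value_word : String × String × Int := ("cat", "car", 1)

def Spec_highest_value_word (word1 : String) (word2 : String) (ordinal_position : Int) (out : Int) : Prop := out = highest_value_word_alt word1 word2 ordinal_position
instance (word1 : String) (word2 : String) (ordinal_position : Int) (out : Int) : Decidable (Spec_highest_value_word word1 word2 ordinal_position out) := by unfold Spec_highest_value_word; infer_instance

-- ===== CLAIM (what is proved, stated in full; the proofs are below) =====
def Claim_equal_highest_value_word : Prop := ∀ (word1 : String) (word2 : String) (ordinal_position : Int), Dom_highest_value_word word1 word2 ordinal_position → Pre_highest_value_word word1 word2 ordinal_position → Spec_highest_value_word word1 word2 ordinal_position (highest_value_word word1 word2 ordinal_position)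

-- ===== LEMMAS AND PROOFS =====

theorem hvw_eq_loop (word1 word2 : String) (op : Int) :
    highest_value_word word1 word2 op =
      hvw_loop word1 word2 (min (PySem.Str.len word1) (PySem.Str.len word2)) op := by
  fun_induction highest_value_word word1 word2 op with
  | case1 op mp h h1 =>
    rw [hvw_loop, dif_neg (not_le.mpr (show min (PySem.Str.len word1) (PySem.Str.len word2) < op from h)), if_pos h1]
  | case2 op mp h h1 h2 =>
    rw [hvw_loop, dif_neg (not_le.mpr (show min (PySem.Str.len word1) (PySem.Str.len word2) < op from h)), if_neg h1, if_pos h2]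
  | case3 op mp h h1 h2 =>
    rw [hvw_loop, dif_neg (not_le.mpr (show min (PySem.Str.len word1) (PySem.Str.len word2) < op from h)), if_neg h1, if_neg h2]
  | case4 op mp h c1 c2 hg1 hg2 heq ih =>
    rw [hvw_loop, dif_pos (show op ≤ min (PySem.Str.len word1) (PySem.Str.len word2) from not_lt.mp h)]
    simp only [hg1, hg2]
    rw [if_pos (Char.ext (UInt32.toNat_inj.mp heq))]
    exact ih
  | case5 op mp h c1 c2 hg1 hg2 hne hgt =>
    rw [hvw_loop, dif_pos (show op ≤ min (PySem.Str.len word1) (PySem.Str.len word2) from not_lt.mp h)]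
    simp only [hg1, hg2]
    rw [if_neg (fun hc => hne (congrArg Char.toNat hc)), if_pos (show c2 < c1 from Char.lt_def.mpr (UInt32.lt_iff_toNat_lt.mpr hgt))]
  | case6 op mp h c1 c2 hg1 hg2 hne hle =>
    rw [hvw_loop, dif_pos (show op ≤ min (PySem.Str.len word1) (PySem.Str.len word2) from not_lt.mp h)]
    simp only [hg1, hg2]
    rw [if_neg (fun hc => hne (congrArg Char.toNat hc)), if_neg (fun hlt => hle (UInt32.lt_iff_toNat_lt.mp (Char.lt_def.mp hlt)))]
  | case7 op mp h hnone =>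
    rw [hvw_loop, dif_pos (show op ≤ min (PySem.Str.len word1) (PySem.Str.len word2) from not_lt.mp h)]
    rcases h1 : PySem.Str.pyGet? word1 (op - 1) with _ | c1 <;>
      rcases h2 : PySem.Str.pyGet? word2 (op - 1) with _ | c2 <;>
      simp_all

-- ===== VERDICT (by name: the statement is the Claim_ definition above) =====
theorem highest_value_word_spec : Claim_equal_highest_value_word := by
  intro word1 word2 op _ _
  exact hvw_eq_loop word1 word2 op
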